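-- pv_equiv track=rewrite | github.com/mome44/Tesi_laurea | code/prova_2.py | repeated_substrings_by_freq_and_length
-- ===== SOURCE A (Python) =====
-- def repeated_substrings_by_freq_and_length(s):
--     # Create suffix array
--     suffixes = sorted([s[i:] for i in range(len(s))])
--
--     # LCP function
--     def lcp(a, b):
--         i = 0
--         while i < len(a) and i < len(b) and a[i] == b[i]:
--             i += 1
--         return a[:i]
--
--     substrings = []
--
--     # Extract repeated substrings (LCP of adjacent suffixes)
--     for i in range(len(suffixes) - 1):
--         common = lcp(suffixes[i], suffixes[i + 1])
--         if len(common) > 1:   # Consider only substrings longer than 1 char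
--             substrings.append(common)
--
--     # Count occurrences in the full text
--     counts = {sub: s.count(sub) for sub in substrings}
--
--     # Sort:
--     # 1️⃣ prima per numero di occorrenze (desc)
--     # 2️⃣ poi per lunghezza della sottostringa (desc)
--     sorted_substrings = sorted(
--         counts.items(),
--         key=lambda x: (x[1], len(x[0])),
--         reverse=True
--     )
--
--     return sorted_substrings
-- ===== SOURCE B (Python) =====
-- def repeated_substrings_by_freq_and_length(s):
--     n = len(s)
--
--     def lcp_len(i, j):
--         k = 0
--         while i + k < n and j + k < n and s[i + k] == s[j + k]:
--             k += 1
--         return k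
--
--     # No suffix array: the set of adjacent-suffix LCPs equals the set of
--     # longest common prefixes over ALL pairs of distinct suffixes, so collect
--     # those directly from the unsorted index pairs.
--     distinct = set()
--     for i in range(n):
--         for j in range(i + 1, n):
--             k = lcp_len(i, j)
--             if k > 1:
--                 distinct.add(s[i:i + k])
--
--     # One total-order sort replaces A's insertion-ordered dict + stable sort:
--     # ties in (count, length) appear in A in lexicographic order of the substring.
--     return sorted(((t, s.count(t)) for t in distinct),
--                   key=lambda x: (-x[1], -len(x[0]), x[0]))
-- ===== Notes on version B (the rewrite author's own statement) =====
-- stated objective: alternative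
-- what changed: B drops the sorted suffix array entirely: it collects the longest common prefixes of ALL pairs of distinct suffixes (which provably equals A's set of adjacent-suffix LCPs) into a set over unsorted index pairs, and replaces A's insertion-ordered dict plus stable two-key sort by a single sort under the total key (-count, -length, substring), exploiting that A's ties appear in lexicographic order.
import Mathlib
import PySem

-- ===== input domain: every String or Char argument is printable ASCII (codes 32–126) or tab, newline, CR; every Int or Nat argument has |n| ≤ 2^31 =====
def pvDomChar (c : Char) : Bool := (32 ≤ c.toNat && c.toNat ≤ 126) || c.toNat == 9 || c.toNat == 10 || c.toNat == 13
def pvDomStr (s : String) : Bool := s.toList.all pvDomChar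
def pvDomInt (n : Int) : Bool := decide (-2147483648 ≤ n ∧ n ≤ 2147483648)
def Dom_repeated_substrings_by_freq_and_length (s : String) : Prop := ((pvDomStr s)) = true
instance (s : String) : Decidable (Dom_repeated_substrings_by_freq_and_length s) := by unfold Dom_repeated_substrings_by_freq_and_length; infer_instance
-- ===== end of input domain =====

-- B removes the suffix array: it collects the longest common prefixes of ALL pairs of distinct
-- suffixes (provably the same set as A's adjacent-suffix LCPs) over unsorted index pairs, and
-- replaces A's insertion-ordered dict plus stable two-key sort by one sort under the total key
-- (-count, -length, substring) (alternative objective; no speed claim).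

-- ===== PORT A =====
-- inner helper `lcp`: while i < len(a) and i < len(b) and a[i] == b[i]: i += 1
-- (a[i] == b[i] is ported as equality of a[i]?/b[i]? : Option Char — exact, both indices are in range when compared)
def pvLcpIdxA (a b : List Char) (i : Nat) : Nat :=
  if h : i < a.length ∧ i < b.length ∧ a[i]? = b[i]? then pvLcpIdxA a b (i + 1) else i
termination_by a.length - i
decreasing_by omega

-- return a[:i]
def pvLcpA (a b : List Char) : List Char :=
  PySem.List.slice a none (some ((pvLcpIdxA a b 0 : Int)))

def repeated_substrings_by_freq_and_length (s : String) : List (String × Int) :=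
  let sL := s.toList
  -- suffixes = sorted([s[i:] for i in range(len(s))])
  let suffixes := PySem.List.sorted ((PySem.List.pyRange 0 (sL.length : Int) 1).map
      (fun i => PySem.List.slice sL (some i) none)) (fun x => x) false
  -- for i in range(len(suffixes) - 1): common = lcp(...); if len(common) > 1: substrings.append(common)
  let substrings := (PySem.List.pyRange 0 ((suffixes.length : Int) - 1) 1).foldl
      (fun acc i =>
        let common := pvLcpA (PySem.List.pyGetD suffixes i []) (PySem.List.pyGetD suffixes (i + 1) [])
        if 1 < common.length then acc ++ [String.ofList common] else acc) []
  -- counts = {sub: s.count(sub) for sub in substrings}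
  let counts : PySem.Dict String Int := substrings.foldl
      (fun d sub => d.insert sub ((PySem.Str.count s sub : Int))) PySem.Dict.empty
  -- sorted(counts.items(), key=lambda x: (x[1], len(x[0])), reverse=True)
  PySem.List.sorted2 counts.items (fun x => x.2) (fun x => PySem.Str.len x.1) true

-- ===== PORT B =====
-- lcp_len: k = 0; while i + k < n and j + k < n and s[i+k] == s[j+k]: k += 1; return k
def pvLcpLenB (sL : List Char) (i j k : Int) : Int :=
  if h : i + k < (sL.length : Int) ∧ j + k < (sL.length : Int) ∧
         PySem.List.pyGet? sL (i + k) = PySem.List.pyGet? sL (j + k) then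
    pvLcpLenB sL i j (k + 1)
  else k
termination_by ((sL.length : Int) - (i + k)).toNat
decreasing_by omega

-- key=lambda x: (-x[1], -len(x[0]), x[0]): Python compares the key tuples lexicographically
-- with strict comparisons component by component; written out here (exact on ASCII strings)
def pvBefore3 (a b : String × Int) : Bool :=
  decide (-a.2 < -b.2) || (!decide (-b.2 < -a.2) &&
    (decide (-(PySem.Str.len a.1) < -(PySem.Str.len b.1)) ||
      (!decide (-(PySem.Str.len b.1) < -(PySem.Str.len a.1)) && decide (a.1 < b.1))))

def repeated_substrings_by_freq_and_length_alt (s : String) : List (String × Int) :=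
  let sL := s.toList
  let n : Int := (sL.length : Int)
  -- distinct = set(); for i in range(n): for j in range(i+1, n): k = lcp_len(i,j); if k > 1: distinct.add(s[i:i+k])
  let distinct : PySem.Set String := (PySem.List.pyRange 0 n 1).foldl
      (fun d i => (PySem.List.pyRange (i + 1) n 1).foldl
        (fun (d : PySem.Set String) j =>
          let k := pvLcpLenB sL i j 0
          if 1 < k then PySem.Set.add d (String.ofList (PySem.List.slice sL (some i) (some (i + k)))) else d)
        d)
      PySem.Set.empty
  -- sorted((t, s.count(t)) for t in distinct, key=…): the key is injective on the set (its last
  -- component is the element itself), so the result does not depend on the set's iteration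
  -- order; ported as the insertion sort PySem uses for sorted (stable; exact)
  (distinct.map (fun t => (t, (PySem.Str.count s t : Int)))).foldl
    (fun acc x => PySem.List.insertBy pvBefore3 x acc) []

-- ===== PRECONDITION & SPEC =====
def Spec_repeated_substrings_by_freq_and_length (s : String) (out : List (String × Int)) : Prop := out = repeated_substrings_by_freq_and_length_alt s
instance (s : String) (out : List (String × Int)) : Decidable (Spec_repeated_substrings_by_freq_and_length s out) := by unfold Spec_repeated_substrings_by_freq_and_length; infer_instance

-- ===== CLAIM (what is proved, stated in full; the proofs are below) =====
def Claim_equal_repeated_substrings_by_freq_and_length : Prop := ∀ (s : String), Dom_repeated_substrings_by_freq_and_length s → Spec_repeated_substrings_by_freq_and_length s (repeated_substrings_by_freq_and_length s)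

-- ===== LEMMAS AND PROOFS =====

-- ---------- the textbook LCP of two character lists, and its relation to the ports' loops ----------

def pvLcpL : List Char → List Char → List Char
  | a :: as, b :: bs => if a = b then a :: pvLcpL as bs else []
  | _, _ => []

theorem pvLcpIdxA_succ (a b : Char) (as bs : List Char) :
    ∀ (d k : Nat), as.length - k ≤ d →
      pvLcpIdxA (a :: as) (b :: bs) (k + 1) = pvLcpIdxA as bs k + 1 := by
  intro d
  induction d with
  | zero =>
      intro k hd
      rw [pvLcpIdxA, dif_neg (by simp; omega), pvLcpIdxA, dif_neg (by simp; omega)]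
  | succ d ih =>
      intro k hd
      by_cases hc : k < as.length ∧ k < bs.length ∧ as[k]? = bs[k]?
      · conv_rhs => rw [pvLcpIdxA]
        rw [dif_pos hc, pvLcpIdxA, dif_pos (by simpa using hc)]
        exact ih (k + 1) (by omega)
      · rw [pvLcpIdxA, dif_neg (by simpa using hc), pvLcpIdxA, dif_neg hc]

theorem pvLcpL_eq_take : ∀ (a b : List Char), pvLcpL a b = a.take (pvLcpIdxA a b 0)
  | [], b => by rw [pvLcpIdxA]; simp [pvLcpL]
  | a :: as, [] => by rw [pvLcpIdxA]; simp [pvLcpL]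
  | a :: as, b :: bs => by
      by_cases hab : a = b
      · rw [pvLcpIdxA, dif_pos (by simp [hab]),
          pvLcpIdxA_succ a b as bs as.length 0 (by omega)]
        simp [pvLcpL, hab, pvLcpL_eq_take as bs]
      · rw [pvLcpIdxA, dif_neg (by simp [hab])]
        simp [pvLcpL, hab]

theorem pvLcpA_eq_lcpL (a b : List Char) : pvLcpA a b = pvLcpL a b := by
  rw [pvLcpA, PySem.List.slice_to _ (by positivity), Int.toNat_natCast, pvLcpL_eq_take]

theorem pvLcpL_comm : ∀ (a b : List Char), pvLcpL a b = pvLcpL b a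
  | [], [] => rfl
  | [], _ :: _ => rfl
  | _ :: _, [] => rfl
  | a :: as, b :: bs => by
      by_cases hab : a = b
      · subst hab; simp [pvLcpL, pvLcpL_comm as bs]
      · simp [pvLcpL, hab, Ne.symm hab]

theorem pvLcpL_prefix_left : ∀ (a b : List Char), pvLcpL a b <+: a
  | [], _ => by simp [pvLcpL]
  | _ :: _, [] => by simp [pvLcpL]
  | a :: as, b :: bs => by
      by_cases hab : a = b
      · obtain ⟨r, hr⟩ := pvLcpL_prefix_left as bs
        exact ⟨r, by simp [pvLcpL, hab, hr]⟩
      · simp [pvLcpL, hab]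

theorem pvLcpL_prefix_right (a b : List Char) : pvLcpL a b <+: b := by
  rw [pvLcpL_comm]; exact pvLcpL_prefix_left b a

-- pv_lcpIdx_le and the index-walk/lcp-string bridge (shared by both ports' loops)
theorem pv_lcpIdx_le (a b : List Char) : ∀ (d k : Nat), a.length - k ≤ d → k ≤ a.length → pvLcpIdxA a b k ≤ a.length := by
  intro d
  induction d with
  | zero =>
      intro k hd hk
      rw [pvLcpIdxA]
      split
      · omega
      · exact hk
  | succ d ih =>
      intro k hd hk
      rw [pvLcpIdxA]
      split
      · next h => exact ih (k+1) (by omega) (by omega)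
      · exact hk

theorem pv_lcpB_eq (sL : List Char) (i' j' : Nat) :
    ∀ (d k' : Nat), sL.length - (i' + k') ≤ d →
      pvLcpLenB sL (i' : Int) (j' : Int) (k' : Int) = ((pvLcpIdxA (sL.drop i') (sL.drop j') k' : Nat) : Int) := by
  intro d
  induction d with
  | zero =>
      intro k' hd
      rw [pvLcpLenB, pvLcpIdxA]
      rw [dif_neg (by omega), dif_neg (by simp; omega)]
  | succ d ih =>
      intro k' hd
      have h1 : (i' : Int) + (k' : Int) = ((i' + k' : Nat) : Int) := by push_cast; ring
      have h2 : (j' : Int) + (k' : Int) = ((j' + k' : Nat) : Int) := by push_cast; ring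
      have eB : ((i' : Int) + (k' : Int) < (sL.length : Int) ∧ (j' : Int) + (k' : Int) < (sL.length : Int) ∧
            PySem.List.pyGet? sL ((i' : Int) + (k' : Int)) = PySem.List.pyGet? sL ((j' : Int) + (k' : Int)))
          ↔ (i' + k' < sL.length ∧ j' + k' < sL.length ∧ sL[i' + k']? = sL[j' + k']?) := by
        rw [h1, h2, PySem.List.pyGet?_natCast, PySem.List.pyGet?_natCast]
        constructor
        · rintro ⟨a, b, c⟩; exact ⟨by omega, by omega, c⟩
        · rintro ⟨a, b, c⟩; exact ⟨by omega, by omega, c⟩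
      have eA : (k' < (sL.drop i').length ∧ k' < (sL.drop j').length ∧
            (sL.drop i')[k']? = (sL.drop j')[k']?)
          ↔ (i' + k' < sL.length ∧ j' + k' < sL.length ∧ sL[i' + k']? = sL[j' + k']?) := by
        rw [List.getElem?_drop, List.getElem?_drop, List.length_drop, List.length_drop]
        constructor
        · rintro ⟨a, b, c⟩; exact ⟨by omega, by omega, c⟩
        · rintro ⟨a, b, c⟩; exact ⟨by omega, by omega, c⟩
      rw [pvLcpLenB, pvLcpIdxA]
      by_cases hc : i' + k' < sL.length ∧ j' + k' < sL.length ∧ sL[i' + k']? = sL[j' + k']?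
      · rw [dif_pos (eB.2 hc), dif_pos (eA.2 hc)]
        have := ih (k' + 1) (by omega)
        push_cast at this ⊢
        exact this
      · rw [dif_neg (fun h => hc (eB.1 h)), dif_neg (fun h => hc (eA.1 h))]

theorem pv_lcpL_drop_len (sL : List Char) (i j : Nat) :
    ((pvLcpL (sL.drop i) (sL.drop j)).length : Int) = pvLcpLenB sL (i : Int) (j : Int) 0 := by
  have hB := pv_lcpB_eq sL i j (sL.length - (i + 0)) 0 (le_refl _)
  simp only [Nat.cast_zero] at hB
  rw [hB, pvLcpL_eq_take]
  have hle : pvLcpIdxA (sL.drop i) (sL.drop j) 0 ≤ (sL.drop i).length :=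
    pv_lcpIdx_le _ _ (sL.drop i).length 0 (by omega) (by omega)
  simp only [List.length_take]
  omega

theorem pv_lcpL_drop_slice (sL : List Char) (i j : Nat) :
    pvLcpL (sL.drop i) (sL.drop j)
      = PySem.List.slice sL (some (i : Int)) (some ((i : Int) + pvLcpLenB sL (i : Int) (j : Int) 0)) := by
  have hB := pv_lcpB_eq sL i j (sL.length - (i + 0)) 0 (le_refl _)
  simp only [Nat.cast_zero] at hB
  rw [pvLcpL_eq_take, hB, PySem.List.slice_toNat _ (by positivity) (by positivity)]
  simp only [Int.toNat_natCast]
  congr 1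
  omega

-- ---------- lexicographic-order facts about common prefixes ----------

theorem pv_lcp3 : ∀ (x y z : List Char), x < y ∨ x = y → y < z ∨ y = z →
    pvLcpL x z = pvLcpL x y ∨ pvLcpL x z = pvLcpL y z := by
  intro x
  induction x with
  | nil =>
      intro y z _ _
      left
      cases y <;> cases z <;> rfl
  | cons a xs ih =>
      intro y z hxy hyz
      rcases hxy with hxy | rfl
      · rcases hyz with hyz | rfl
        · cases y with
          | nil => exact absurd hxy (by simp)
          | cons b ys =>
            cases z with
            | nil => exact absurd hyz (by simp)
            | cons c zs =>
              rw [List.cons_lt_cons_iff] at hxy hyz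
              rcases hxy with hab | ⟨rfl, hxy⟩
              · have hac : a < c := by
                  rcases hyz with hbc | ⟨rfl, _⟩
                  · exact lt_trans hab hbc
                  · exact hab
                left
                simp [pvLcpL, ne_of_lt hab, ne_of_lt hac]
              · rcases hyz with hbc | ⟨rfl, hyz⟩
                · right
                  simp [pvLcpL, ne_of_lt hbc]
                · rcases ih ys zs (Or.inl hxy) (Or.inl hyz) with h | h
                  · left; simp [pvLcpL, h]
                  · right; simp [pvLcpL, h]
        · left; rfl
      · right; rfl

theorem pv_prefix_le : ∀ (t u x y : List Char), t <+: x → u <+: y → (x < y ∨ x = y) →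
    t.length = u.length → t < u ∨ t = u := by
  intro t
  induction t with
  | nil =>
      intro u x y _ _ _ hlen
      right
      cases u with
      | nil => rfl
      | cons _ _ => simp at hlen
  | cons a ts ih =>
      intro u x y htx huy hxy hlen
      cases u with
      | nil => simp at hlen
      | cons b us =>
        obtain ⟨x', rfl⟩ := htx
        obtain ⟨y', rfl⟩ := huy
        have hxy' : (ts ++ x') < (us ++ y') ∨ a < b ∨ (a = b ∧ (ts ++ x') = (us ++ y')) := by
          rcases hxy with h | h
          · rw [List.cons_append, List.cons_append, List.cons_lt_cons_iff] at h
            rcases h with h | ⟨rfl, h⟩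
            · exact Or.inr (Or.inl h)
            · exact Or.inl h
          · rw [List.cons_append, List.cons_append] at h
            exact Or.inr (Or.inr ⟨(List.cons.inj h).1, (List.cons.inj h).2⟩)
        rcases hxy' with h | h | ⟨rfl, h⟩
        · by_cases hab : a = b
          · subst hab
            rcases ih us (ts ++ x') (us ++ y') ⟨x', rfl⟩ ⟨y', rfl⟩ (Or.inl h) (by simpa using hlen) with h' | h'
            · left; rw [List.cons_lt_cons_iff]; exact Or.inr ⟨rfl, h'⟩
            · right; rw [h']
          · rcases lt_trichotomy a b with hab' | hab' | hab'
            · left; rw [List.cons_lt_cons_iff]; exact Or.inl hab'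
            · exact absurd hab' hab
            · -- a > b contradicts (a::ts++x') < (b::us++y') or equality handled above
              exfalso
              rcases hxy with hlt | heq
              · rw [List.cons_append, List.cons_append, List.cons_lt_cons_iff] at hlt
                rcases hlt with hlt | ⟨rfl, _⟩
                · exact absurd hlt (lt_asymm hab')
                · exact hab rfl
              · rw [List.cons_append, List.cons_append] at heq
                exact hab (List.cons.inj heq).1
        · left; rw [List.cons_lt_cons_iff]; exact Or.inl h
        · rcases ih us (ts ++ x') (us ++ y') ⟨x', rfl⟩ ⟨y', rfl⟩ (Or.inr h) (by simpa using hlen) with h' | h'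
          · left; rw [List.cons_lt_cons_iff]; exact Or.inr ⟨rfl, h'⟩
          · right; rw [h']

-- ---------- the sorted suffix list of port A ----------

theorem pv_sorted_inst {α : Type} (xs : List α) (key : α → List Char) (rev : Bool) :
    @PySem.List.sorted α (List Char) List.instLT (fun a b => a.decidableLT b) xs key rev
      = @PySem.List.sorted α (List Char) List.instLinearOrder.toLT LinearOrder.toDecidableLT xs key rev := by
  have h : (fun (a b : List Char) => a.decidableLT b)
      = (LinearOrder.toDecidableLT : @DecidableLT (List Char) List.instLT) := by
    funext a b
    exact Subsingleton.elim _ _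
  exact congrArg (fun d => @PySem.List.sorted α (List Char) List.instLT d xs key rev) h

def pvSuffixes (l : List Char) : List (List Char) :=
  PySem.List.sorted ((PySem.List.pyRange 0 (l.length : Int) 1).map
    (fun i => PySem.List.slice l (some i) none)) (fun x => x) false

theorem pv_sufmap (l : List Char) :
    (PySem.List.pyRange 0 (l.length : Int) 1).map (fun i => PySem.List.slice l (some i) none)
      = (List.range l.length).map (fun k => l.drop k) := by
  apply List.ext_getElem
  · simp [PySem.List.length_pyRange_one]
  · intro k h1 h2
    simp only [List.getElem_map, List.getElem_range]
    rw [PySem.List.getElem_pyRange_one, zero_add, PySem.List.slice_from _ (by positivity),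
      Int.toNat_natCast]

theorem pv_mem_suffixes (l : List Char) (x : List Char) :
    x ∈ pvSuffixes l ↔ ∃ i : Nat, i < l.length ∧ x = l.drop i := by
  rw [pvSuffixes, (PySem.List.sorted_perm _ _ _).mem_iff, pv_sufmap]
  simp only [List.mem_map, List.mem_range]
  constructor
  · rintro ⟨i, hi, rfl⟩; exact ⟨i, hi, rfl⟩
  · rintro ⟨i, hi, rfl⟩; exact ⟨i, hi, rfl⟩

theorem pv_nodup_suffixes (l : List Char) : (pvSuffixes l).Nodup := by
  rw [pvSuffixes]
  refine ((PySem.List.sorted_perm _ _ _).nodup_iff).2 ?_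
  rw [pv_sufmap]
  refine List.Nodup.map_on ?_ List.nodup_range
  intro i hi j hj hij
  have := congrArg List.length hij
  simp only [List.length_drop] at this
  simp only [List.mem_range] at hi hj
  omega

theorem pv_suffixes_mono (l : List Char) (p q : Nat) (hpq : p ≤ q) (hq : q < (pvSuffixes l).length) :
    (pvSuffixes l).getD p [] < (pvSuffixes l).getD q [] ∨ (pvSuffixes l).getD p [] = (pvSuffixes l).getD q [] := by
  rw [List.getD_eq_getElem _ _ (lt_of_le_of_lt hpq hq), List.getD_eq_getElem _ _ hq]
  have h0 : pvSuffixes l = @PySem.List.sorted (List Char) (List Char) List.instLinearOrder.toLT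
      LinearOrder.toDecidableLT ((PySem.List.pyRange 0 (l.length : Int) 1).map
        (fun i => PySem.List.slice l (some i) none)) (fun x => x) false := by
    rw [pvSuffixes, pv_sorted_inst]
  have hq' : q < (@PySem.List.sorted (List Char) (List Char) List.instLinearOrder.toLT
      LinearOrder.toDecidableLT ((PySem.List.pyRange 0 (l.length : Int) 1).map
        (fun i => PySem.List.slice l (some i) none)) (fun x => x) false).length := by
    rw [← h0]; exact hq
  have := PySem.List.sorted_id_getElem_mono ((PySem.List.pyRange 0 (l.length : Int) 1).map
      (fun i => PySem.List.slice l (some i) none)) hpq hq'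
  have h2 := lt_or_eq_of_le this
  simp only [← h0] at h2
  exact h2

-- ---------- the candidate stream of port A and the pair set of port B describe the same substrings ----------

def pvStream (l : List Char) : List String :=
  ((PySem.List.pyRange 0 (((pvSuffixes l).length : Int) - 1) 1).filter
      (fun t => decide (1 < (pvLcpA (PySem.List.pyGetD (pvSuffixes l) t [])
        (PySem.List.pyGetD (pvSuffixes l) (t + 1) [])).length))).map
    (fun t => String.ofList (pvLcpA (PySem.List.pyGetD (pvSuffixes l) t [])
      (PySem.List.pyGetD (pvSuffixes l) (t + 1) [])))

def pvE (l : List Char) (u : String) : Prop :=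
  ∃ i j : Nat, i < l.length ∧ j < l.length ∧ i ≠ j ∧
    1 < (pvLcpL (l.drop i) (l.drop j)).length ∧
    u = String.ofList (pvLcpL (l.drop i) (l.drop j))

theorem pv_getD_int (l : List Char) (t : Int) (ht : 0 ≤ t) :
    PySem.List.pyGetD (pvSuffixes l) t [] = (pvSuffixes l).getD t.toNat [] := by
  have h : t = ((t.toNat : Nat) : Int) := by omega
  conv_lhs => rw [h]
  rw [PySem.List.pyGetD_natCast]

theorem pv_mem_stream (l : List Char) (u : String) :
    u ∈ pvStream l ↔ ∃ r : Nat, r + 1 < (pvSuffixes l).length ∧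
      1 < (pvLcpL ((pvSuffixes l).getD r []) ((pvSuffixes l).getD (r + 1) [])).length ∧
      u = String.ofList (pvLcpL ((pvSuffixes l).getD r []) ((pvSuffixes l).getD (r + 1) [])) := by
  rw [pvStream]
  simp only [List.mem_map, List.mem_filter, PySem.List.mem_pyRange_iff_of_pos (by norm_num : (0:Int) < 1),
    decide_eq_true_eq, pvLcpA_eq_lcpL]
  constructor
  · rintro ⟨t, ⟨⟨ht0, ht1, -⟩, hlen⟩, rfl⟩
    have e1 : PySem.List.pyGetD (pvSuffixes l) t [] = (pvSuffixes l).getD t.toNat [] :=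
      pv_getD_int _ _ ht0
    have e2 : PySem.List.pyGetD (pvSuffixes l) (t + 1) [] = (pvSuffixes l).getD (t.toNat + 1) [] := by
      rw [pv_getD_int _ _ (by omega)]
      congr 1
      omega
    rw [e1, e2] at hlen ⊢
    exact ⟨t.toNat, by omega, hlen, rfl⟩
  · rintro ⟨r, hr, hlen, rfl⟩
    have e1 : PySem.List.pyGetD (pvSuffixes l) (r : Int) [] = (pvSuffixes l).getD r [] :=
      PySem.List.pyGetD_natCast _ _ _
    have e2 : PySem.List.pyGetD (pvSuffixes l) ((r : Int) + 1) [] = (pvSuffixes l).getD (r + 1) [] := by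
      rw [show ((r : Int) + 1) = ((r + 1 : Nat) : Int) by omega, PySem.List.pyGetD_natCast]
    refine ⟨(r : Int), ⟨⟨by positivity, by omega, by omega⟩, ?_⟩, ?_⟩
    · rw [e1, e2]; exact hlen
    · rw [e1, e2]

theorem pv_adjacent_range (l : List Char) : ∀ (dq p q : Nat), q - p ≤ dq → p < q → q < (pvSuffixes l).length →
    ∃ r : Nat, p ≤ r ∧ r < q ∧
      pvLcpL ((pvSuffixes l).getD r []) ((pvSuffixes l).getD (r + 1) [])
        = pvLcpL ((pvSuffixes l).getD p []) ((pvSuffixes l).getD q []) := by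
  intro dq
  induction dq with
  | zero => intro p q h1 h2 h3; omega
  | succ d ih =>
      intro p q h1 h2 h3
      by_cases hq : q = p + 1
      · exact ⟨p, le_refl p, by omega, by rw [hq]⟩
      · have h4 : p + 1 < q := by omega
        have hlcp := pv_lcp3 ((pvSuffixes l).getD p []) ((pvSuffixes l).getD (p + 1) [])
          ((pvSuffixes l).getD q [])
          (pv_suffixes_mono l p (p + 1) (by omega) (by omega))
          (pv_suffixes_mono l (p + 1) q (by omega) h3)
        rcases hlcp with h | h
        · exact ⟨p, le_refl p, by omega, h.symm⟩
        · obtain ⟨r, hr1, hr2, hr3⟩ := ih (p + 1) q (by omega) h4 h3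
          exact ⟨r, by omega, hr2, by rw [hr3, h]⟩

theorem pv_stream_iff_E (l : List Char) (u : String) : u ∈ pvStream l ↔ pvE l u := by
  rw [pv_mem_stream]
  constructor
  · rintro ⟨r, hr, hlen, rfl⟩
    have hx : (pvSuffixes l).getD r [] ∈ pvSuffixes l := by
      rw [List.getD_eq_getElem _ _ (by omega)]; exact List.getElem_mem _
    have hy : (pvSuffixes l).getD (r + 1) [] ∈ pvSuffixes l := by
      rw [List.getD_eq_getElem _ _ hr]; exact List.getElem_mem _
    obtain ⟨i, hi, hxi⟩ := (pv_mem_suffixes l _).1 hx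
    obtain ⟨j, hj, hyj⟩ := (pv_mem_suffixes l _).1 hy
    have hne : (pvSuffixes l).getD r [] ≠ (pvSuffixes l).getD (r + 1) [] := by
      rw [List.getD_eq_getElem _ _ (by omega), List.getD_eq_getElem _ _ hr]
      have := List.pairwise_iff_getElem.1 (pv_nodup_suffixes l) r (r + 1) (by omega) hr (by omega)
      exact this
    rw [hxi, hyj] at hlen hne ⊢
    exact ⟨i, j, hi, hj, fun hij => hne (by rw [hij]), hlen, rfl⟩
  · rintro ⟨i, j, hi, hj, hij, hlen, rfl⟩
    have hdropne : l.drop i ≠ l.drop j := by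
      intro h
      have := congrArg List.length h
      simp only [List.length_drop] at this
      omega
    obtain ⟨p, hp, hpe⟩ := List.mem_iff_getElem.1 ((pv_mem_suffixes l _).2 ⟨i, hi, rfl⟩)
    obtain ⟨q, hq, hqe⟩ := List.mem_iff_getElem.1 ((pv_mem_suffixes l _).2 ⟨j, hj, rfl⟩)
    have hpq : p ≠ q := by
      intro h; subst h; rw [hpe] at hqe; exact hdropne hqe
    rcases Nat.lt_or_ge p q with hlt | hge
    · obtain ⟨r, hr1, hr2, hr3⟩ := pv_adjacent_range l q p q (by omega) hlt hq
      refine ⟨r, by omega, ?_, ?_⟩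
      · rw [hr3, List.getD_eq_getElem _ _ hp, List.getD_eq_getElem _ _ hq, hpe, hqe]
        exact hlen
      · rw [hr3, List.getD_eq_getElem _ _ hp, List.getD_eq_getElem _ _ hq, hpe, hqe]
    · have hlt : q < p := by omega
      obtain ⟨r, hr1, hr2, hr3⟩ := pv_adjacent_range l p q p (by omega) hlt hp
      refine ⟨r, by omega, ?_, ?_⟩
      · rw [hr3, List.getD_eq_getElem _ _ hp, List.getD_eq_getElem _ _ hq, hpe, hqe, pvLcpL_comm]
        exact hlen
      · rw [hr3, List.getD_eq_getElem _ _ hp, List.getD_eq_getElem _ _ hq, hpe, hqe, pvLcpL_comm]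

theorem pv_stream_pairwise (l : List Char) :
    (pvStream l).Pairwise (fun t u => PySem.Str.len t = PySem.Str.len u → t ≠ u → t < u) := by
  rw [pvStream]
  rw [List.pairwise_map]
  have h0 : (PySem.List.pyRange 0 (((pvSuffixes l).length : Int) - 1) 1).Pairwise (fun a b => a < b) :=
    PySem.List.pairwise_lt_pyRange_one _ _
  have h1 := h0.filter (fun t => decide (1 < (pvLcpA (PySem.List.pyGetD (pvSuffixes l) t [])
        (PySem.List.pyGetD (pvSuffixes l) (t + 1) [])).length))
  refine h1.imp_of_mem ?_
  intro t1 t2 ht1 ht2 hlt hslen hsne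
  have hb1 := (PySem.List.mem_pyRange_iff_of_pos (by norm_num : (0:Int) < 1) t1).1 (List.mem_of_mem_filter ht1)
  have hb2 := (PySem.List.mem_pyRange_iff_of_pos (by norm_num : (0:Int) < 1) t2).1 (List.mem_of_mem_filter ht2)
  obtain ⟨h10, h11, -⟩ := hb1
  obtain ⟨h20, h21, -⟩ := hb2
  rw [pvLcpA_eq_lcpL, pvLcpA_eq_lcpL, pv_getD_int _ _ h10, pv_getD_int _ _ h20,
    show t1 + 1 = ((t1.toNat + 1 : Nat) : Int) by omega,
    show t2 + 1 = ((t2.toNat + 1 : Nat) : Int) by omega,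
    PySem.List.pyGetD_natCast, PySem.List.pyGetD_natCast] at hslen hsne ⊢
  set r1 := t1.toNat
  set r2 := t2.toNat
  set A1 := pvLcpL ((pvSuffixes l).getD r1 []) ((pvSuffixes l).getD (r1 + 1) []) with hA1
  set A2 := pvLcpL ((pvSuffixes l).getD r2 []) ((pvSuffixes l).getD (r2 + 1) []) with hA2
  have hpre1 : A1 <+: (pvSuffixes l).getD (r1 + 1) [] := pvLcpL_prefix_right _ _
  have hpre2 : A2 <+: (pvSuffixes l).getD r2 [] := pvLcpL_prefix_left _ _
  have hmono := pv_suffixes_mono l (r1 + 1) r2 (by omega) (by omega)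
  have hlen' : A1.length = A2.length := by
    have e1 : PySem.Str.len (String.ofList A1) = (A1.length : Int) := by simp [PySem.Str.len]
    have e2 : PySem.Str.len (String.ofList A2) = (A2.length : Int) := by simp [PySem.Str.len]
    rw [e1, e2] at hslen
    omega
  have hlistne : A1 ≠ A2 := by
    intro h; exact hsne (by rw [h])
  have := pv_prefix_le A1 A2 _ _ hpre1 hpre2 hmono hlen'
  rcases this with h | h
  · rw [String.lt_iff_toList_lt, String.toList_ofList, String.toList_ofList]
    exact h
  · exact absurd h hlistne

-- ---------- loop shapes: A's append loop, A's dict comprehension, B's nested set-building loops ----------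

theorem pv_foldA {α β : Type} (cand : α → List Char) (mk : List Char → β) :
    ∀ (l : List α) (acc : List β),
      l.foldl (fun acc t =>
          let common := cand t
          if 1 < common.length then acc ++ [mk common] else acc) acc
        = acc ++ ((l.filter (fun t => decide (1 < (cand t).length))).map (fun t => mk (cand t))) := by
  intro l
  induction l with
  | nil => intro acc; simp
  | cons t l ih =>
      intro acc
      by_cases h : 1 < (cand t).length
      · simp [List.foldl_cons, h, ih]
      · simp [List.foldl_cons, h, ih]

theorem pv_dict_fold (g : String → Int) (l : List String) :
    (l.foldl (fun (d : PySem.Dict String Int) sub => d.insert sub (g sub)) PySem.Dict.empty).items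
      = (PySem.Set.ofList l).map (fun k => (k, g k)) := by
  induction l using List.reverseRecOn with
  | nil => simp [PySem.Set.ofList_nil, PySem.Dict.empty]
  | append_singleton l x ih =>
      rw [List.foldl_append, List.foldl_cons, List.foldl_nil]
      have hkeys : (l.foldl (fun (d : PySem.Dict String Int) sub => d.insert sub (g sub)) PySem.Dict.empty).keys
          = PySem.Set.ofList l := by
        show ((l.foldl (fun (d : PySem.Dict String Int) sub => d.insert sub (g sub)) PySem.Dict.empty).items).map Prod.fst = _
        rw [ih, List.map_map]
        have h2 : ((fun (x : String × Int) => x.1) ∘ fun k => (k, g k)) = id := rfl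
        rw [h2, List.map_id]
      by_cases hx : x ∈ PySem.Set.ofList l
      · have hc : (l.foldl (fun (d : PySem.Dict String Int) sub => d.insert sub (g sub)) PySem.Dict.empty).contains x = true := by
          rw [PySem.Dict.contains_iff_mem_keys, hkeys]; exact hx
        rw [PySem.Dict.items_insert_of_contains _ _ hc, ih, PySem.Set.ofList_append_singleton,
          PySem.Set.add_of_mem hx, List.map_map]
        apply List.map_congr_left
        intro k hk
        by_cases hkx : k = x
        · subst hkx; simp
        · simp [hkx]
      · have hc : (l.foldl (fun (d : PySem.Dict String Int) sub => d.insert sub (g sub)) PySem.Dict.empty).contains x = false := by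
          rw [← Bool.not_eq_true, PySem.Dict.contains_iff_mem_keys, hkeys]; exact hx
        rw [PySem.Dict.items_insert_of_not_contains _ _ hc, ih, PySem.Set.ofList_append_singleton,
          PySem.Set.add_of_not_mem hx, List.map_append]
        simp

-- Set.ofList keeps a sublist (first occurrences), so pairwise properties survive deduplication
theorem pv_discard_sublist {α : Type} [BEq α] (s : PySem.Set α) (x : α) :
    (PySem.Set.discard s x).Sublist s := by
  simp only [PySem.Set.discard]
  exact List.filter_sublist

theorem pv_ofList_sublist {α : Type} [BEq α] [LawfulBEq α] :
    ∀ (xs : List α), (PySem.Set.ofList xs).Sublist xs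
  | [] => by simp [PySem.Set.ofList_nil]
  | x :: xs => by
      rw [PySem.Set.ofList_cons]
      exact ((pv_discard_sublist (PySem.Set.ofList xs) x).trans (pv_ofList_sublist xs)).cons₂ x

-- membership of B's nested pair loop
theorem pv_mem_foldl_sets {β : Type} (F : PySem.Set String → β → PySem.Set String)
    (P : β → String → Prop) :
    ∀ (L : List β), (∀ d i u, i ∈ L → (u ∈ F d i ↔ u ∈ d ∨ P i u)) →
    ∀ (d : PySem.Set String) (u : String), u ∈ L.foldl F d ↔ u ∈ d ∨ ∃ i ∈ L, P i u := by
  intro L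
  induction L with
  | nil => intro _ d u; simp
  | cons x xs ih =>
      intro hstep d u
      rw [List.foldl_cons, ih (fun d i u hi => hstep d i u (List.mem_cons_of_mem x hi)),
        hstep d x u List.mem_cons_self]
      constructor
      · rintro ((h | h) | ⟨i, hi, h⟩)
        · exact Or.inl h
        · exact Or.inr ⟨x, List.mem_cons_self, h⟩
        · exact Or.inr ⟨i, List.mem_cons_of_mem x hi, h⟩
      · rintro (h | ⟨i, hi, h⟩)
        · exact Or.inl (Or.inl h)
        · rcases List.mem_cons.1 hi with rfl | hi
          · exact Or.inl (Or.inr h)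
          · exact Or.inr ⟨i, hi, h⟩

theorem pv_nodup_foldl_sets {β : Type} (L : List β) (F : PySem.Set String → β → PySem.Set String)
    (hstep : ∀ d i, d.Nodup → (F d i).Nodup) :
    ∀ (d : PySem.Set String), d.Nodup → (L.foldl F d).Nodup := by
  induction L with
  | nil => intro d hd; exact hd
  | cons x xs ih => intro d hd; exact ih _ (hstep d x hd)

-- ---------- a stable insertion sort is the strict sort of the index-decorated list ----------

def pvDec {α : Type} (bef : α → α → Bool) (p q : α × Nat) : Bool :=
  bef p.1 q.1 || (!bef q.1 p.1 && decide (p.2 < q.2))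

theorem pv_map_insertBy {α β : Type} (f : α → β) (q : α → α → Bool) (p : β → β → Bool)
    (z : α) : ∀ (zs : List α), (∀ y ∈ zs, q z y = p (f z) (f y)) →
    (PySem.List.insertBy q z zs).map f = PySem.List.insertBy p (f z) (zs.map f) := by
  intro zs
  induction zs with
  | nil => intro _; rfl
  | cons y ys ih =>
      intro h
      rw [PySem.List.insertBy, List.map_cons, PySem.List.insertBy,
        ← h y List.mem_cons_self]
      by_cases hq : q z y = true
      · rw [if_pos hq, if_pos hq, List.map_cons, List.map_cons]
      · rw [if_neg hq, if_neg hq, List.map_cons,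
          ih (fun w hw => h w (List.mem_cons_of_mem y hw))]

theorem pv_stable {α : Type} (bef : α → α → Bool) :
    ∀ (xs : List α),
      xs.foldl (fun acc x => PySem.List.insertBy bef x acc) []
        = ((xs.zipIdx).foldl (fun acc p => PySem.List.insertBy (pvDec bef) p acc) []).map Prod.fst := by
  intro xs
  induction xs using List.reverseRecOn with
  | nil => rfl
  | append_singleton xs x ih =>
      rw [List.foldl_append, List.foldl_cons, List.foldl_nil,
        List.zipIdx_append, List.foldl_append]
      simp only [List.zipIdx, List.foldl_cons, List.foldl_nil]
      simp only [Nat.zero_add]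
      set acc' := (xs.zipIdx).foldl (fun acc p => PySem.List.insertBy (pvDec bef) p acc) [] with hacc
      have hmem : ∀ y ∈ acc', y.2 < xs.length := by
        intro y hy
        have hperm := PySem.List.foldl_insertBy_perm (pvDec bef) xs.zipIdx []
        rw [← hacc] at hperm
        have : y ∈ xs.zipIdx := by
          have := hperm.mem_iff.1 hy
          simpa using this
        obtain ⟨y1, y2⟩ := y
        have := List.mem_zipIdx this
        omega
      rw [pv_map_insertBy Prod.fst (pvDec bef) bef (x, xs.length) acc'
        (by
          intro y hy
          have hl := hmem y hy
          simp only [pvDec]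
          rw [decide_eq_false (by omega : ¬ (xs.length < y.2))]
          simp), ← ih]

-- ---------- the insertion sort orders its output (no ties among the relevant elements) ----------

theorem pv_insertBy_pairwise {α : Type} (bef : α → α → Bool)
    (htr : ∀ a b c, bef a b = true → bef b c = true → bef a c = true)
    (has : ∀ a b, bef a b = true → bef b a = false)
    (x : α) : ∀ (acc : List α), acc.Pairwise (fun a b => bef b a = false) →
      (PySem.List.insertBy bef x acc).Pairwise (fun a b => bef b a = false) := by
  intro acc
  induction acc with
  | nil => intro _; simp [PySem.List.insertBy]
  | cons y ys ih =>
      intro h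
      rw [PySem.List.insertBy]
      by_cases hxy : bef x y = true
      · rw [if_pos hxy]
        refine List.Pairwise.cons ?_ h
        intro z hz
        rcases List.mem_cons.1 hz with rfl | hz
        · exact has x z hxy
        · by_cases hzx : bef z x = true
          · have := htr z x y hzx hxy
            have h2 := (List.pairwise_cons.1 h).1 z hz
            rw [h2] at this
            exact absurd this (by simp)
          · simpa using hzx
      · rw [if_neg hxy]
        refine List.Pairwise.cons ?_ (ih (List.pairwise_cons.1 h).2)
        intro z hz
        rcases (PySem.List.mem_insertBy _ _ _ _).1 hz with rfl | hz
        · simpa using hxy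
        · exact (List.pairwise_cons.1 h).1 z hz

theorem pv_foldl_insertBy_pairwise {α : Type} (bef : α → α → Bool)
    (htr : ∀ a b c, bef a b = true → bef b c = true → bef a c = true)
    (has : ∀ a b, bef a b = true → bef b a = false) :
    ∀ (xs : List α) (acc : List α), acc.Pairwise (fun a b => bef b a = false) →
      (xs.foldl (fun acc x => PySem.List.insertBy bef x acc) acc).Pairwise (fun a b => bef b a = false) := by
  intro xs
  induction xs with
  | nil => intro acc h; exact h
  | cons x xs ih =>
      intro acc h
      exact ih _ (pv_insertBy_pairwise bef htr has x acc h)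

theorem pv_strict {α : Type} (bef : α → α → Bool) (l : List α)
    (h1 : l.Pairwise (fun a b => bef b a = false)) (h2 : l.Nodup)
    (htot : ∀ a b, a ∈ l → b ∈ l → a ≠ b → bef a b = true ∨ bef b a = true) :
    l.Pairwise (fun a b => bef a b = true) := by
  refine (h1.and h2).imp_of_mem ?_
  intro a b ha hb hab
  rcases htot a b ha hb hab.2 with h | h
  · exact h
  · rw [hab.1] at h
    exact absurd h (by simp)

-- ---------- the two comparison relations and their order properties ----------

def pvBftA : (String × Int) → (String × Int) → Bool := fun a b =>
  decide (b.2 < a.2) || (!decide (a.2 < b.2) && decide (PySem.Str.len b.1 < PySem.Str.len a.1))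

theorem pv_sorted2_eq (xs : List (String × Int)) :
    PySem.List.sorted2 xs (fun x => x.2) (fun x => PySem.Str.len x.1) true
      = xs.foldl (fun acc x => PySem.List.insertBy pvBftA x acc) [] := rfl

theorem pv_before3_iff (a b : String × Int) :
    pvBefore3 a b = true ↔ (b.2 < a.2 ∨ (a.2 = b.2 ∧ (PySem.Str.len b.1 < PySem.Str.len a.1 ∨
      (PySem.Str.len a.1 = PySem.Str.len b.1 ∧ a.1 < b.1)))) := by
  by_cases hs : a.1 < b.1 <;>
    simp only [pvBefore3, Bool.or_eq_true, Bool.and_eq_true, Bool.not_eq_true',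
      decide_eq_true_eq, decide_eq_false_iff_not, hs, and_true, and_false, or_false] <;>
    omega

theorem pv_decA_iff (p q : (String × Int) × Nat) :
    pvDec pvBftA p q = true ↔ (q.1.2 < p.1.2 ∨ (p.1.2 = q.1.2 ∧
      (PySem.Str.len q.1.1 < PySem.Str.len p.1.1 ∨
        (PySem.Str.len p.1.1 = PySem.Str.len q.1.1 ∧ p.2 < q.2)))) := by
  simp only [pvDec, pvBftA, Bool.or_eq_true, Bool.and_eq_true, Bool.not_eq_true',
    decide_eq_true_eq, decide_eq_false_iff_not, Bool.or_eq_false_iff, Bool.and_eq_false_iff,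
    Bool.not_eq_false']
  omega

theorem pv_decA_tr (a b c : (String × Int) × Nat)
    (h1 : pvDec pvBftA a b = true) (h2 : pvDec pvBftA b c = true) : pvDec pvBftA a c = true := by
  rw [pv_decA_iff] at h1 h2 ⊢
  omega

theorem pv_decA_as (a b : (String × Int) × Nat) (h : pvDec pvBftA a b = true) :
    pvDec pvBftA b a = false := by
  rw [Bool.eq_false_iff]
  intro h2
  rw [pv_decA_iff] at h h2
  omega

theorem pv_decA_tot (a b : (String × Int) × Nat) (h : a.2 ≠ b.2) :
    pvDec pvBftA a b = true ∨ pvDec pvBftA b a = true := by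
  rw [pv_decA_iff, pv_decA_iff]
  omega

theorem pv_before3_tr (a b c : String × Int)
    (h1 : pvBefore3 a b = true) (h2 : pvBefore3 b c = true) : pvBefore3 a c = true := by
  rw [pv_before3_iff] at h1 h2 ⊢
  rcases h1 with h1 | ⟨e1, h1⟩
  · rcases h2 with h2 | ⟨e2, h2⟩
    · left; omega
    · left; omega
  · rcases h2 with h2 | ⟨e2, h2⟩
    · left; omega
    · refine Or.inr ⟨by omega, ?_⟩
      rcases h1 with h1 | ⟨f1, hs1⟩
      · rcases h2 with h2 | ⟨f2, hs2⟩
        · left; omega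
        · left; omega
      · rcases h2 with h2 | ⟨f2, hs2⟩
        · left; omega
        · exact Or.inr ⟨by omega, lt_trans hs1 hs2⟩

theorem pv_before3_as (a b : String × Int) (h : pvBefore3 a b = true) : pvBefore3 b a = false := by
  rw [Bool.eq_false_iff]
  intro h2
  rw [pv_before3_iff] at h h2
  rcases h with h | ⟨e1, h⟩ <;> rcases h2 with h2 | ⟨e2, h2⟩
  · omega
  · omega
  · omega
  · rcases h with h | ⟨f1, hs1⟩ <;> rcases h2 with h2 | ⟨f2, hs2⟩
    · omega
    · omega
    · omega
    · exact absurd (lt_trans hs1 hs2) (lt_irrefl _)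

theorem pv_before3_tot (a b : String × Int) (h : a.1 ≠ b.1) :
    pvBefore3 a b = true ∨ pvBefore3 b a = true := by
  rw [pv_before3_iff, pv_before3_iff]
  rcases lt_trichotomy a.2 b.2 with hc | hc | hc
  · right; left; exact hc
  · rcases lt_trichotomy (PySem.Str.len a.1) (PySem.Str.len b.1) with hl | hl | hl
    · right; exact Or.inr ⟨hc.symm, Or.inl hl⟩
    · rcases lt_trichotomy a.1 b.1 with hs | hs | hs
      · left; exact Or.inr ⟨hc, Or.inr ⟨hl, hs⟩⟩
      · exact absurd hs h
      · right; exact Or.inr ⟨hc.symm, Or.inr ⟨hl.symm, hs⟩⟩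
    · left; exact Or.inr ⟨hc, Or.inl hl⟩
  · left; left; exact hc

-- ---------- port B's distinct set ----------

def pvDB (s : String) : PySem.Set String :=
  (PySem.List.pyRange 0 ((s.toList.length : Int)) 1).foldl
    (fun d i => (PySem.List.pyRange (i + 1) ((s.toList.length : Int)) 1).foldl
      (fun (d : PySem.Set String) j =>
        if 1 < pvLcpLenB s.toList i j 0 then
          PySem.Set.add d (String.ofList (PySem.List.slice s.toList (some i)
            (some (i + pvLcpLenB s.toList i j 0))))
        else d)
      d)
    PySem.Set.empty

theorem pv_nodup_DB (s : String) : (pvDB s).Nodup := by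
  rw [pvDB]
  refine pv_nodup_foldl_sets _ _ ?_ _ List.nodup_nil
  intro d i hd
  refine pv_nodup_foldl_sets _ _ ?_ _ hd
  intro d' j hd'
  split
  · exact PySem.Set.nodup_add _ _ hd'
  · exact hd'

theorem pv_mem_DB (s : String) (u : String) : u ∈ pvDB s ↔ pvE s.toList u := by
  rw [pvDB,
    pv_mem_foldl_sets _
      (fun i u => ∃ j ∈ PySem.List.pyRange (i + 1) ((s.toList.length : Int)) 1,
        1 < pvLcpLenB s.toList i j 0 ∧
        u = String.ofList (PySem.List.slice s.toList (some i)
          (some (i + pvLcpLenB s.toList i j 0)))) _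
      (by
        intro d i u _
        rw [pv_mem_foldl_sets _
          (fun j u => 1 < pvLcpLenB s.toList i j 0 ∧
            u = String.ofList (PySem.List.slice s.toList (some i)
              (some (i + pvLcpLenB s.toList i j 0)))) _
          (by
            intro d' j u' _
            by_cases hc : 1 < pvLcpLenB s.toList i j 0
            · rw [if_pos hc, PySem.Set.mem_add]
              constructor
              · rintro (h | h)
                · exact Or.inl h
                · exact Or.inr ⟨hc, h⟩
              · rintro (h | ⟨-, h⟩)
                · exact Or.inl h
                · exact Or.inr h
            · rw [if_neg hc]
              constructor
              · exact Or.inl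
              · rintro (h | ⟨h, -⟩)
                · exact h
                · exact absurd h hc)])]
  constructor
  · rintro (h | ⟨i, hi, j, hj, hk, rfl⟩)
    · exact absurd h (by simp [PySem.Set.empty])
    · obtain ⟨hi0, hi1, -⟩ := (PySem.List.mem_pyRange_iff_of_pos (by norm_num) i).1 hi
      obtain ⟨hj0, hj1, -⟩ := (PySem.List.mem_pyRange_iff_of_pos (by norm_num) j).1 hj
      have ei : i = ((i.toNat : Nat) : Int) := by omega
      have ej : j = ((j.toNat : Nat) : Int) := by omega
      rw [ei, ej] at hk ⊢
      have hlen := pv_lcpL_drop_len s.toList i.toNat j.toNat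
      have hsl := pv_lcpL_drop_slice s.toList i.toNat j.toNat
      exact ⟨i.toNat, j.toNat, by omega, by omega, by omega, by omega, by rw [hsl]⟩
  · rintro ⟨i, j, hi, hj, hij, hlen, rfl⟩
    right
    have hdl := pv_lcpL_drop_len s.toList
    have hds := pv_lcpL_drop_slice s.toList
    rcases Nat.lt_or_ge i j with hlt | hge
    · refine ⟨(i : Int), ?_, (j : Int), ?_, ?_, ?_⟩
      · rw [PySem.List.mem_pyRange_iff_of_pos (by norm_num)]
        exact ⟨by positivity, by omega, one_dvd _⟩
      · rw [PySem.List.mem_pyRange_iff_of_pos (by norm_num)]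
        exact ⟨by omega, by omega, one_dvd _⟩
      · have := hdl i j; omega
      · rw [← hds i j]
    · have hlt : j < i := by omega
      refine ⟨(j : Int), ?_, (i : Int), ?_, ?_, ?_⟩
      · rw [PySem.List.mem_pyRange_iff_of_pos (by norm_num)]
        exact ⟨by positivity, by omega, one_dvd _⟩
      · rw [PySem.List.mem_pyRange_iff_of_pos (by norm_num)]
        exact ⟨by omega, by omega, one_dvd _⟩
      · have := hdl j i; rw [pvLcpL_comm] at hlen; omega
      · rw [← hds j i, pvLcpL_comm]

-- ---------- assembly ----------

theorem pv_main (s : String) :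
    repeated_substrings_by_freq_and_length s = repeated_substrings_by_freq_and_length_alt s := by
  have hf : Function.Injective (fun t : String => (t, (PySem.Str.count s t : Int))) := by
    intro a b h
    exact congrArg Prod.fst h
  have hA : repeated_substrings_by_freq_and_length s
      = (((((PySem.Set.ofList (pvStream s.toList)).map
            (fun t => (t, (PySem.Str.count s t : Int)))).zipIdx).foldl
          (fun acc p => PySem.List.insertBy (pvDec pvBftA) p acc) []).map Prod.fst) := by
    simp only [repeated_substrings_by_freq_and_length]
    rw [pv_foldA, List.nil_append, pv_dict_fold, pv_sorted2_eq, pv_stable]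
    rfl
  have hB : repeated_substrings_by_freq_and_length_alt s
      = ((pvDB s).map (fun t => (t, (PySem.Str.count s t : Int)))).foldl
          (fun acc x => PySem.List.insertBy pvBefore3 x acc) [] := rfl
  rw [hA, hB]
  set f : String → String × Int := fun t => (t, (PySem.Str.count s t : Int)) with hfdef
  set DA := PySem.Set.ofList (pvStream s.toList) with hDAdef
  set items := DA.map f with hitemsdef
  set O := (items.zipIdx).foldl (fun acc p => PySem.List.insertBy (pvDec pvBftA) p acc) [] with hOdef
  set LB := ((pvDB s).map f).foldl (fun acc x => PySem.List.insertBy pvBefore3 x acc) [] with hLBdef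
  -- distinct-substring sets agree
  have hDAnodup : DA.Nodup := PySem.Set.nodup_ofList _
  have hDBnodup : (pvDB s).Nodup := pv_nodup_DB s
  have hDperm : DA.Perm (pvDB s) := by
    rw [List.perm_ext_iff_of_nodup hDAnodup hDBnodup]
    intro u
    rw [hDAdef, PySem.Set.mem_ofList, pv_stream_iff_E, pv_mem_DB]
  -- the decorated A-side sort
  have hOperm : O.Perm items.zipIdx := by
    have h := PySem.List.foldl_insertBy_perm (pvDec pvBftA) items.zipIdx []
    rw [← hOdef] at h
    simpa using h
  have hOnodup : O.Nodup := by
    refine hOperm.nodup_iff.2 (List.Nodup.of_map Prod.snd ?_)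
    rw [List.zipIdx_map_snd]
    exact List.nodup_range' 1
  have hOpw := pv_foldl_insertBy_pairwise (pvDec pvBftA) pv_decA_tr pv_decA_as items.zipIdx []
    List.Pairwise.nil
  rw [← hOdef] at hOpw
  have hOtot : ∀ a b, a ∈ O → b ∈ O → a ≠ b →
      pvDec pvBftA a b = true ∨ pvDec pvBftA b a = true := by
    intro a b ha hb hne
    refine pv_decA_tot a b ?_
    intro h2
    apply hne
    obtain ⟨a1, a2⟩ := a
    obtain ⟨b1, b2⟩ := b
    have hpz := List.mem_zipIdx (hOperm.mem_iff.1 ha)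
    have hqz := List.mem_zipIdx (hOperm.mem_iff.1 hb)
    simp only [Nat.sub_zero] at hpz hqz h2 ⊢
    subst h2
    rw [hpz.2.2, hqz.2.2]
  have hOstrict := pv_strict _ O hOpw hOnodup hOtot
  -- tie order inside items (equal count and length ⇒ lexicographically increasing)
  have hQ : items.Pairwise (fun x y => PySem.Str.len x.1 = PySem.Str.len y.1 → x.1 < y.1) := by
    have hsp := pv_stream_pairwise s.toList
    have hDApw : DA.Pairwise (fun t u => PySem.Str.len t = PySem.Str.len u → t ≠ u → t < u) :=
      List.Pairwise.sublist (pv_ofList_sublist _) hsp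
    have hnd : DA.Pairwise (· ≠ ·) := hDAnodup
    exact List.Pairwise.map f (fun a b h hlen => h.1 hlen h.2) (hDApw.and hnd)
  have hOR : O.Pairwise (fun p q => pvBefore3 p.1 q.1 = true) := by
    refine hOstrict.imp_of_mem ?_
    intro p q hp hq hpq
    rw [pv_decA_iff] at hpq
    rw [pv_before3_iff]
    rcases hpq with h | ⟨e, h⟩
    · exact Or.inl h
    · rcases h with h | ⟨e2, h⟩
      · exact Or.inr ⟨e, Or.inl h⟩
      · refine Or.inr ⟨e, Or.inr ⟨e2, ?_⟩⟩
        obtain ⟨p1, p2⟩ := p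
        obtain ⟨q1, q2⟩ := q
        have hpz := List.mem_zipIdx (hOperm.mem_iff.1 hp)
        have hqz := List.mem_zipIdx (hOperm.mem_iff.1 hq)
        simp only [Nat.sub_zero] at hpz hqz
        have hQg := List.pairwise_iff_getElem.1 hQ p2 q2 (by omega) (by omega) h
        simp only at e2 ⊢
        rw [hpz.2.2, hqz.2.2]
        exact hQg (by rw [← hpz.2.2, ← hqz.2.2]; exact e2)
  have hLApw : (O.map Prod.fst).Pairwise (fun a b => pvBefore3 a b = true) :=
    List.Pairwise.map Prod.fst (fun a b h => h) hOR
  -- the B-side sort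
  have hLBperm : LB.Perm ((pvDB s).map f) := by
    have h := PySem.List.foldl_insertBy_perm pvBefore3 ((pvDB s).map f) []
    rw [← hLBdef] at h
    simpa using h
  have hLBnodup : LB.Nodup := hLBperm.nodup_iff.2 (List.Nodup.map hf hDBnodup)
  have hLBpw0 := pv_foldl_insertBy_pairwise pvBefore3 pv_before3_tr pv_before3_as
    ((pvDB s).map f) [] List.Pairwise.nil
  rw [← hLBdef] at hLBpw0
  have hLBtot : ∀ a b, a ∈ LB → b ∈ LB → a ≠ b →
      pvBefore3 a b = true ∨ pvBefore3 b a = true := by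
    intro a b ha hb hne
    refine pv_before3_tot a b ?_
    intro h1
    apply hne
    obtain ⟨ta, hta, haf⟩ := List.mem_map.1 (hLBperm.mem_iff.1 ha)
    obtain ⟨tb, htb, hbf⟩ := List.mem_map.1 (hLBperm.mem_iff.1 hb)
    rw [← haf, ← hbf]
    have hts : ta = tb := by
      rw [← haf, ← hbf] at h1
      exact h1
    rw [hts]
  have hLBstrict := pv_strict _ LB hLBpw0 hLBnodup hLBtot
  -- the two results are permutations of each other and both strictly ordered by pvBefore3
  have hperm : (O.map Prod.fst).Perm LB := by
    have h1 : (O.map Prod.fst).Perm items := by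
      have := hOperm.map Prod.fst
      rwa [List.zipIdx_map_fst] at this
    have h2 : items.Perm ((pvDB s).map f) := by
      rw [hitemsdef]
      exact hDperm.map f
    exact (h1.trans h2).trans hLBperm.symm
  exact List.Perm.eq_of_pairwise
    (fun a b _ _ h1 h2 => absurd h2 (by simp [pv_before3_as a b h1]))
    hLApw hLBstrict hperm

-- ===== VERDICT (by name: the statement is the Claim_ definition above) =====
theorem repeated_substrings_by_freq_and_length_spec : Claim_equal_repeated_substrings_by_freq_and_length := by
  intro s _
  exact pv_main s
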